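-- pv_equiv track=rewrite | github.com/DJLougen/RBForge | src/RBForge/forge_tool.py | remove_graph_blocks
-- ===== SOURCE A (Python) =====
-- def remove_graph_blocks(lines: list[str]) -> list[str]:
--     cleaned: list[str] = []
--     index = 0
--     while index < len(lines):
--         if lines[index].strip() != "graph:":
--             cleaned.append(lines[index])
--             index += 1
--             continue
--         index += 1
--         while index < len(lines):
--             stripped = lines[index].strip()
--             top_level = lines[index] and not lines[index].startswith((" ", "\t"))
--             if top_level and stripped not in {"", "graph:"}:
--                 break
--             index += 1
--     return cleaned
-- ===== SOURCE B (Python) =====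
-- def remove_graph_blocks(lines: list[str]) -> list[str]:
--     # Find-and-slice strategy: repeatedly locate the next "graph:" marker,
--     # keep the slice before it, then locate the block's terminating line and
--     # resume from there; no per-line state machine.
--     def find_index(pred, xs):
--         for k, x in enumerate(xs):
--             if pred(x):
--                 return k
--         return None
--
--     def is_marker(line: str) -> bool:
--         return line.strip() == "graph:"
--
--     def is_terminator(line: str) -> bool:
--         return bool(line) and not line.startswith((" ", "\t")) and line.strip() not in ("", "graph:")
--
--     out: list[str] = []
--     rest = lines
--     while True:
--         i = find_index(is_marker, rest)
--         if i is None: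
--             out.extend(rest)
--             return out
--         body = rest[i + 1:]
--         j = find_index(is_terminator, body)
--         if j is None:
--             out.extend(rest[:i])
--             return out
--         out.extend(rest[:i])
--         rest = body[j:]
-- ===== Notes on version B (the rewrite author's own statement) =====
-- stated objective: alternative
-- what changed: Replaced A's per-line state machine (nested while loops over a shared index) with a find-and-slice algorithm: repeatedly locate the next 'graph:' marker, copy the whole slice before it, locate the block's terminator, and resume from that slice.
import Mathlib
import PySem

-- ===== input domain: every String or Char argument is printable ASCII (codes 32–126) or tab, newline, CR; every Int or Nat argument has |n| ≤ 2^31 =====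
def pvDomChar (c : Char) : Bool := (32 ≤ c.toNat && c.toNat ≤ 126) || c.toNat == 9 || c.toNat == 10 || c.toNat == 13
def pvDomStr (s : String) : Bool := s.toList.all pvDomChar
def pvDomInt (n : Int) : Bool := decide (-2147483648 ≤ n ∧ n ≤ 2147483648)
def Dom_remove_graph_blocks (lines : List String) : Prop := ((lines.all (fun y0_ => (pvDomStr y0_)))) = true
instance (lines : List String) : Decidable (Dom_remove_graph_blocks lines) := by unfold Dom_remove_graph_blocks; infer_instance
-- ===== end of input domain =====

-- B replaces A's per-line state machine (nested while loops over a shared index) with a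
-- find-and-slice algorithm: locate the next "graph:" marker, keep the slice before it,
-- locate the block terminator, resume there (objective: alternative).

-- ===== PORT A =====
-- inner while loop of A: advance the index past skipped lines, returning the remaining suffix
def rgbSkip : List String → List String
  | [] => []
  | l :: rest =>
    let stripped := PySem.Str.strip l
    let top_level := (l != "") && !(PySem.Str.startswith l " " || PySem.Str.startswith l "\t")
    if top_level && (stripped != "" && stripped != "graph:") then l :: rest
    else rgbSkip rest

theorem rgbSkip_length_le (ls : List String) : (rgbSkip ls).length ≤ ls.length := by
  induction ls with
  | nil => simp [rgbSkip]
  | cons l rest ih =>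
    simp only [rgbSkip]
    split
    · simp
    · exact le_trans ih (Nat.le_succ _)

def remove_graph_blocks (lines : List String) : List String :=
  match lines with
  | [] => []
  | l :: rest =>
    if PySem.Str.strip l != "graph:" then l :: remove_graph_blocks rest
    else remove_graph_blocks (rgbSkip rest)
termination_by lines.length
decreasing_by
  · simp
  · exact Nat.lt_succ_of_le (rgbSkip_length_le rest)

-- ===== PORT B =====
-- B's find_index helper (first index satisfying the predicate, none if absent)
def rgbFindIndex (p : String → Bool) : List String → Option Nat
  | [] => none
  | l :: rest => if p l then some 0 else (rgbFindIndex p rest).map (· + 1)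

-- B's is_marker
def rgbIsMarker (l : String) : Bool := PySem.Str.strip l == "graph:"

-- B's is_terminator
def rgbIsTerminator (l : String) : Bool :=
  (l != "") && !(PySem.Str.startswith l " " || PySem.Str.startswith l "\t")
    && (PySem.Str.strip l != "" && PySem.Str.strip l != "graph:")

theorem rgbFindIndex_lt_length {p : String → Bool} : ∀ {ls : List String} {i : Nat},
    rgbFindIndex p ls = some i → i < ls.length := by
  intro ls
  induction ls with
  | nil => intro i h; simp [rgbFindIndex] at h
  | cons l rest ih =>
    intro i h
    by_cases hp : p l
    · simp [rgbFindIndex, hp] at h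
      simp [List.length_cons, ← h]
    · simp [rgbFindIndex, hp] at h
      obtain ⟨k, hk, rfl⟩ := h
      exact Nat.succ_lt_succ (ih hk)

-- B's loop: keep the slice before the next marker, skip to the block terminator, resume
def remove_graph_blocks_alt (lines : List String) : List String :=
  match hm : rgbFindIndex rgbIsMarker lines with
  | none => lines
  | some i =>
    let body := lines.drop (i + 1)
    match rgbFindIndex rgbIsTerminator body with
    | none => lines.take i
    | some j => lines.take i ++ remove_graph_blocks_alt (body.drop j)
termination_by lines.length
decreasing_by
  have hi := rgbFindIndex_lt_length hm
  simp only [List.length_drop]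
  omega

-- ===== PRECONDITION & SPEC =====
def Spec_remove_graph_blocks (lines : List String) (out : List String) : Prop := out = remove_graph_blocks_alt lines
instance (lines : List String) (out : List String) : Decidable (Spec_remove_graph_blocks lines out) := by unfold Spec_remove_graph_blocks; infer_instance

-- ===== CLAIM (what is proved, stated in full; the proofs are below) =====
def Claim_equal_remove_graph_blocks : Prop := ∀ (lines : List String), Dom_remove_graph_blocks lines → Spec_remove_graph_blocks lines (remove_graph_blocks lines)

-- ===== LEMMAS AND PROOFS =====

-- A's inner skip loop stops exactly at the first terminator (B's find_index view of it)
theorem rgbSkip_eq (ls : List String) :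
    rgbSkip ls = (match rgbFindIndex rgbIsTerminator ls with
      | none => []
      | some j => ls.drop j) := by
  induction ls with
  | nil => simp [rgbSkip, rgbFindIndex]
  | cons l rest ih =>
    simp only [rgbSkip, rgbFindIndex, rgbIsTerminator]
    split
    · rename_i h
      simp
    · rename_i h
      rw [ih]
      cases hf : rgbFindIndex rgbIsTerminator rest <;> simp

-- A's outer loop up to the first marker, phrased as B's take/drop split
theorem rgbA_eq (ls : List String) :
    remove_graph_blocks ls = (match rgbFindIndex rgbIsMarker ls with
      | none => ls
      | some i => ls.take i ++ remove_graph_blocks (rgbSkip (ls.drop (i + 1)))) := by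
  induction ls with
  | nil => simp [remove_graph_blocks, rgbFindIndex]
  | cons l rest ih =>
    by_cases h : PySem.Str.strip l = "graph:"
    · simp [remove_graph_blocks, rgbFindIndex, rgbIsMarker, h]
    · rw [remove_graph_blocks, if_pos (by simpa using h)]
      rw [ih]
      simp only [rgbFindIndex, rgbIsMarker, beq_iff_eq, if_neg h]
      cases hf : rgbFindIndex rgbIsMarker rest <;> simp [hf]

-- main equivalence
theorem rgb_main (ls : List String) : remove_graph_blocks ls = remove_graph_blocks_alt ls := by
  rw [rgbA_eq, remove_graph_blocks_alt]
  cases hm : rgbFindIndex rgbIsMarker ls with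
  | none => simp
  | some i =>
    simp only [rgbSkip_eq]
    cases ht : rgbFindIndex rgbIsTerminator (ls.drop (i + 1)) with
    | none => simp [remove_graph_blocks]
    | some j =>
      have hrec := rgb_main ((ls.drop (i + 1)).drop j)
      simp only [List.drop_drop] at hrec ⊢
      simp [hrec]
termination_by ls.length
decreasing_by
  have hi := rgbFindIndex_lt_length hm
  simp only [List.length_drop]
  omega

-- ===== VERDICT (by name: the statement is the Claim_ definition above) =====
theorem remove_graph_blocks_spec : Claim_equal_remove_graph_blocks := by
  intro lines _
  unfold Spec_remove_graph_blocks
  exact rgb_main lines
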